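-- pv_equiv track=rewrite | github.com/G-Gromko/GG_praca_inzynierska | code/utils.py | remove_wrong_whitespace
-- ===== SOURCE A (Python) =====
-- def remove_wrong_whitespace(pred):
--
--     i = 1
--     while i < len(pred):
--         if pred[i] == pred[i-1] and pred[i] == '<b>':
--             pred.pop(i)
--             i -= 1
--         elif pred[i] == pred[i-1] and pred[i] == '<t>':
--             pred.pop(i)
--             i -= 1
--         elif pred[i] == pred[i-1] and pred[i] == '<s>':
--             pred.pop(i)
--             i -= 1
--         elif pred[i] == '<b>' and pred[i-1] == '<t>':
--             pred.insert(i, '.')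
--             i += 1
--         elif pred[i-1] == '<b>' and pred[i] == '<t>':
--             pred.pop(i)
--             i -= 1
--         elif pred[i-1] == '<b>' and pred[i] == '<s>':
--             pred.pop(i)
--             i -= 1
--         elif pred[i-1] == '<s>' and pred[i] == '<t>':
--             pred.pop(i-1)
--             i -= 1
--         elif pred[i-1] == '<s>' and pred[i] == '<b>':
--             pred.pop(i-1)
--             i -= 1
--         i += 1
--
--     return pred
-- ===== SOURCE B (Python) =====
-- def remove_wrong_whitespace(pred):
--     # One left-to-right pass keeping the finished prefix as a stack `out`;
--     # each incoming token is resolved against the top of the stack.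
--     # Like A, mutates `pred` so the caller sees the normalized list.
--     out = []
--     for tok in pred:
--         if not out:
--             out.append(tok)
--             continue
--         top = out[-1]
--         if tok == top and tok in ('<b>', '<t>', '<s>'):
--             continue                      # duplicate marker: drop it
--         if top == '<t>' and tok == '<b>':
--             out.append('.')               # sentence break after <t>: add '.'
--             out.append(tok)
--             continue
--         if top == '<b>' and tok in ('<t>', '<s>'):
--             continue                      # marker right after <b>: drop it
--         if top == '<s>' and tok in ('<t>', '<b>'):
--             out[-1] = tok                 # <s> before a stronger marker: replace it
--             continue
--         out.append(tok)
--     pred[:] = out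
--     return pred
-- ===== Notes on version B (the rewrite author's own statement) =====
-- stated objective: faster
-- what changed: Replaced A's in-place while-loop that repeatedly pops/inserts into the middle of the list (each O(n)) by a single left-to-right pass that builds the result as a stack, resolving each token against the stack top.
import Mathlib
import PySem

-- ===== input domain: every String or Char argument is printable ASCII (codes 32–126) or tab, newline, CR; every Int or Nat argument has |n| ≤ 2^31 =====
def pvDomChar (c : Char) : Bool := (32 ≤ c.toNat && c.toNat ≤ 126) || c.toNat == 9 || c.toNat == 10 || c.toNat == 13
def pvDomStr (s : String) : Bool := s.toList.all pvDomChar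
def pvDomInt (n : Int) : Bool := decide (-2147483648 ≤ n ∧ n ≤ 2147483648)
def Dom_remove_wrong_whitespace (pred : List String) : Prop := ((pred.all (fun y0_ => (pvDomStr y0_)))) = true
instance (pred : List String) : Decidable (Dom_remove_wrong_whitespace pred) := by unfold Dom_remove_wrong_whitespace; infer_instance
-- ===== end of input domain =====

-- B replaces A's quadratic in-place pop/insert loop by one linear stack pass; both Pythons
-- mutate the argument list (the same final contents); the theorems are about the return value.

-- ===== PORT A =====
-- literal port of A's while loop: the list and the index i are the loop state;
-- pred[i] / pred[i-1] are in range whenever read (1 ≤ i < len), ported as getD.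
-- `fuel` only guards totality (the measure 3*len-2*i shrinks each iteration);
-- with the initial fuel 3*len it is never exhausted.
def remove_wrong_whitespace_loop : Nat → List String → Nat → List String
  | 0, pred, _ => pred
  | fuel+1, pred, i =>
    if i < pred.length then
      if pred.getD i "" = pred.getD (i-1) "" ∧ pred.getD i "" = "<b>" then
        remove_wrong_whitespace_loop fuel (pred.eraseIdx i) i            -- pop(i); i -= 1; i += 1
      else if pred.getD i "" = pred.getD (i-1) "" ∧ pred.getD i "" = "<t>" then
        remove_wrong_whitespace_loop fuel (pred.eraseIdx i) i
      else if pred.getD i "" = pred.getD (i-1) "" ∧ pred.getD i "" = "<s>" then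
        remove_wrong_whitespace_loop fuel (pred.eraseIdx i) i
      else if pred.getD i "" = "<b>" ∧ pred.getD (i-1) "" = "<t>" then
        remove_wrong_whitespace_loop fuel (pred.insertIdx i ".") (i+2)   -- insert(i,'.'); i += 1; i += 1
      else if pred.getD (i-1) "" = "<b>" ∧ pred.getD i "" = "<t>" then
        remove_wrong_whitespace_loop fuel (pred.eraseIdx i) i
      else if pred.getD (i-1) "" = "<b>" ∧ pred.getD i "" = "<s>" then
        remove_wrong_whitespace_loop fuel (pred.eraseIdx i) i
      else if pred.getD (i-1) "" = "<s>" ∧ pred.getD i "" = "<t>" then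
        remove_wrong_whitespace_loop fuel (pred.eraseIdx (i-1)) i        -- pop(i-1); i -= 1; i += 1
      else if pred.getD (i-1) "" = "<s>" ∧ pred.getD i "" = "<b>" then
        remove_wrong_whitespace_loop fuel (pred.eraseIdx (i-1)) i
      else
        remove_wrong_whitespace_loop fuel pred (i+1)
    else pred

def remove_wrong_whitespace (pred : List String) : List String :=
  remove_wrong_whitespace_loop (3 * pred.length) pred 1

-- ===== PORT B =====
-- one step of B's for-loop: resolve token `tok` against the top of the stack `out`
def rww_step (out : List String) (tok : String) : List String :=
  if out = [] then out ++ [tok]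
  else
    let top := PySem.List.pyGetD out (-1) ""                      -- out[-1]
    if tok = top ∧ (tok = "<b>" ∨ tok = "<t>" ∨ tok = "<s>") then out
    else if top = "<t>" ∧ tok = "<b>" then out ++ ["."] ++ [tok]
    else if top = "<b>" ∧ (tok = "<t>" ∨ tok = "<s>") then out
    else if top = "<s>" ∧ (tok = "<t>" ∨ tok = "<b>") then out.dropLast ++ [tok]
    else out ++ [tok]

def remove_wrong_whitespace_alt (pred : List String) : List String :=
  pred.foldl rww_step []

-- ===== PRECONDITION & SPEC =====
def Spec_remove_wrong_whitespace (pred : List String) (out : List String) : Prop := out = remove_wrong_whitespace_alt pred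
instance (pred : List String) (out : List String) : Decidable (Spec_remove_wrong_whitespace pred out) := by unfold Spec_remove_wrong_whitespace; infer_instance

-- ===== CLAIM (what is proved, stated in full; the proofs are below) =====
def Claim_equal_remove_wrong_whitespace : Prop := ∀ (pred : List String), Dom_remove_wrong_whitespace pred → Spec_remove_wrong_whitespace pred (remove_wrong_whitespace pred)

-- ===== LEMMAS AND PROOFS =====

lemma rww_getD_last (out : List String) (z : List String) (h : out ≠ []) :
    (out ++ z).getD (out.length - 1) "" = out.getLast h := by
  have hl : out.length - 1 < out.length := by
    cases out with | nil => exact absurd rfl h | cons a t => simp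
  rw [List.getD_append _ _ _ _ hl, List.getD_eq_getElem _ _ hl, List.getLast_eq_getElem]

lemma rww_getD_mid (out : List String) (c : String) (z : List String) :
    (out ++ c :: z).getD out.length "" = c := by
  simp [List.getD]

lemma rww_eraseIdx_mid (out : List String) (c : String) (z : List String) :
    (out ++ c :: z).eraseIdx out.length = out ++ z := by
  induction out with
  | nil => simp
  | cons a t ih => simp [List.eraseIdx_cons_succ, ih]

lemma rww_insertIdx_mid (out : List String) (c : String) (z : List String) :
    (out ++ z).insertIdx out.length c = out ++ c :: z := by
  induction out with
  | nil => simp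
  | cons a t ih => simp [List.insertIdx_succ_cons, ih]

lemma rww_eraseIdx_last (out z : List String) (h : out ≠ []) :
    (out ++ z).eraseIdx (out.length - 1) = out.dropLast ++ z := by
  induction out with
  | nil => exact absurd rfl h
  | cons a t ih =>
    cases t with
    | nil => simp
    | cons b t' =>
      have h2 : (a :: b :: t').length - 1 = ((b :: t').length - 1) + 1 := by simp
      rw [List.cons_append, h2, List.eraseIdx_cons_succ, ih (by simp)]
      simp [List.dropLast]

lemma rww_step_nonempty (out : List String) (tok : String) (h : out ≠ []) :
    rww_step out tok =
      if tok = out.getLast h ∧ (tok = "<b>" ∨ tok = "<t>" ∨ tok = "<s>") then out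
      else if out.getLast h = "<t>" ∧ tok = "<b>" then out ++ [".", tok]
      else if out.getLast h = "<b>" ∧ (tok = "<t>" ∨ tok = "<s>") then out
      else if out.getLast h = "<s>" ∧ (tok = "<t>" ∨ tok = "<b>") then out.dropLast ++ [tok]
      else out ++ [tok] := by
  simp only [rww_step, if_neg h, PySem.List.pyGetD_neg_one out "" h]
  simp

lemma rww_main : ∀ (fuel : Nat) (out rest : List String), out ≠ [] →
    3 * (out ++ rest).length - 2 * out.length ≤ fuel →
    remove_wrong_whitespace_loop fuel (out ++ rest) out.length = rest.foldl rww_step out := by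
  intro fuel
  induction fuel with
  | zero =>
    intro out rest h hf
    have h1 : 1 ≤ out.length := List.length_pos_iff.mpr h
    simp only [List.length_append] at hf
    omega
  | succ fuel ih =>
    intro out rest h hf
    cases rest with
    | nil =>
      simp [remove_wrong_whitespace_loop]
    | cons cur rest =>
      have h1 : 1 ≤ out.length := List.length_pos_iff.mpr h
      have hlen : out.length < (out ++ cur :: rest).length := by simp
      have hprev := rww_getD_last out (cur :: rest) h
      have hcur := rww_getD_mid out cur rest
      have hfe : 3 * (out ++ rest).length - 2 * out.length ≤ fuel := by
        simp only [List.length_append, List.length_cons] at hf ⊢; omega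
      have hfc : out.length + 3 * rest.length + 3 ≤ fuel + 1 := by
        simp only [List.length_append, List.length_cons] at hf; omega
      rw [remove_wrong_whitespace_loop, if_pos hlen, List.foldl_cons,
          rww_step_nonempty out cur h]
      simp only [hprev, hcur]
      by_cases c1 : cur = out.getLast h ∧ cur = "<b>"
      · rw [if_pos c1, rww_eraseIdx_mid, if_pos ⟨c1.1, Or.inl c1.2⟩]
        exact ih out rest h hfe
      rw [if_neg c1]
      by_cases c2 : cur = out.getLast h ∧ cur = "<t>"
      · rw [if_pos c2, rww_eraseIdx_mid, if_pos ⟨c2.1, Or.inr (Or.inl c2.2)⟩]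
        exact ih out rest h hfe
      rw [if_neg c2]
      by_cases c3 : cur = out.getLast h ∧ cur = "<s>"
      · rw [if_pos c3, rww_eraseIdx_mid, if_pos ⟨c3.1, Or.inr (Or.inr c3.2)⟩]
        exact ih out rest h hfe
      rw [if_neg c3]
      by_cases c4 : cur = "<b>" ∧ out.getLast h = "<t>"
      · rw [if_pos c4, rww_insertIdx_mid,
            if_neg (by rintro ⟨e, -⟩; rw [c4.1, c4.2] at e; exact absurd e (by decide)),
            if_pos ⟨c4.2, c4.1⟩]
        have e1 : out ++ "." :: cur :: rest = (out ++ [".", cur]) ++ rest := by simp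
        have e2 : out.length + 2 = (out ++ [".", cur]).length := by simp
        rw [e1, e2]
        exact ih (out ++ [".", cur]) rest (by simp)
          (by simp only [List.length_append, List.length_cons, List.length_nil]; omega)
      rw [if_neg c4]
      by_cases c5 : out.getLast h = "<b>" ∧ cur = "<t>"
      · rw [if_pos c5, rww_eraseIdx_mid,
            if_neg (by rintro ⟨e, -⟩; rw [c5.2, c5.1] at e; exact absurd e (by decide)),
            if_neg (by rintro ⟨e, -⟩; rw [c5.1] at e; exact absurd e (by decide)),
            if_pos ⟨c5.1, Or.inl c5.2⟩]
        exact ih out rest h hfe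
      rw [if_neg c5]
      by_cases c6 : out.getLast h = "<b>" ∧ cur = "<s>"
      · rw [if_pos c6, rww_eraseIdx_mid,
            if_neg (by rintro ⟨e, -⟩; rw [c6.2, c6.1] at e; exact absurd e (by decide)),
            if_neg (by rintro ⟨-, e⟩; rw [c6.2] at e; exact absurd e (by decide)),
            if_pos ⟨c6.1, Or.inr c6.2⟩]
        exact ih out rest h hfe
      rw [if_neg c6]
      by_cases c7 : out.getLast h = "<s>" ∧ cur = "<t>"
      · rw [if_pos c7, rww_eraseIdx_last out (cur :: rest) h,
            if_neg (by rintro ⟨e, -⟩; rw [c7.2, c7.1] at e; exact absurd e (by decide)),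
            if_neg (by rintro ⟨e, -⟩; rw [c7.1] at e; exact absurd e (by decide)),
            if_neg (by rintro ⟨e, -⟩; rw [c7.1] at e; exact absurd e (by decide)),
            if_pos ⟨c7.1, Or.inl c7.2⟩]
        have e1 : out.dropLast ++ cur :: rest = (out.dropLast ++ [cur]) ++ rest := by simp
        have e2 : out.length = (out.dropLast ++ [cur]).length := by
          cases out with | nil => exact absurd rfl h | cons a t => simp
        rw [e1, e2]
        exact ih (out.dropLast ++ [cur]) rest (by simp)
          (by simp only [List.length_append, List.length_cons, List.length_nil,
                List.length_dropLast]; omega)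
      rw [if_neg c7]
      by_cases c8 : out.getLast h = "<s>" ∧ cur = "<b>"
      · rw [if_pos c8, rww_eraseIdx_last out (cur :: rest) h,
            if_neg (by rintro ⟨e, -⟩; rw [c8.2, c8.1] at e; exact absurd e (by decide)),
            if_neg (by rintro ⟨e, -⟩; rw [c8.1] at e; exact absurd e (by decide)),
            if_neg (by rintro ⟨e, -⟩; rw [c8.1] at e; exact absurd e (by decide)),
            if_pos ⟨c8.1, Or.inr c8.2⟩]
        have e1 : out.dropLast ++ cur :: rest = (out.dropLast ++ [cur]) ++ rest := by simp
        have e2 : out.length = (out.dropLast ++ [cur]).length := by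
          cases out with | nil => exact absurd rfl h | cons a t => simp
        rw [e1, e2]
        exact ih (out.dropLast ++ [cur]) rest (by simp)
          (by simp only [List.length_append, List.length_cons, List.length_nil,
                List.length_dropLast]; omega)
      rw [if_neg c8,
          if_neg (by rintro ⟨e, hb | ht | hs⟩; exacts [c1 ⟨e, hb⟩, c2 ⟨e, ht⟩, c3 ⟨e, hs⟩]),
          if_neg (fun ⟨e1, e2⟩ => c4 ⟨e2, e1⟩),
          if_neg (by rintro ⟨e1, e2 | e2⟩; exacts [c5 ⟨e1, e2⟩, c6 ⟨e1, e2⟩]),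
          if_neg (by rintro ⟨e1, e2 | e2⟩; exacts [c7 ⟨e1, e2⟩, c8 ⟨e1, e2⟩])]
      have e1 : out ++ cur :: rest = (out ++ [cur]) ++ rest := by simp
      have e2 : out.length + 1 = (out ++ [cur]).length := by simp
      rw [e1, e2]
      exact ih (out ++ [cur]) rest (by simp)
        (by simp only [List.length_append, List.length_cons, List.length_nil]; omega)

theorem rww_eq (pred : List String) :
    remove_wrong_whitespace pred = remove_wrong_whitespace_alt pred := by
  cases pred with
  | nil => rfl
  | cons a t =>
    have := rww_main (3 * (a :: t).length) [a] t (by simp)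
      (by simp)
    simpa [remove_wrong_whitespace, remove_wrong_whitespace_alt] using this

-- ===== VERDICT (by name: the statement is the Claim_ definition above) =====
theorem remove_wrong_whitespace_spec : Claim_equal_remove_wrong_whitespace := by
  intro pred _
  exact (rww_eq pred).symm ▸ rfl
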